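-- pv_equiv track=rewrite | github.com/abhijaypatne/PythonPractice | 2023/cohesity.py | get_minimum_groups2
-- ===== SOURCE A (Python) =====
-- def get_minimum_groups2(length: list, breadth: list):
--     n = len(length) - 1
--     rectangles = [(length[i], breadth[i]) for i in range(n)]
--     rectangles.sort(key=lambda x: x[0])
--     lis = [1] * n
--
--     for i in range(1, n):
--         for j in range(i):
--             if rectangles[i][1] >= rectangles[j][1]:
--                 lis[i] = max(lis[i], lis[j] + 1)
--
--     return n - max(lis)
-- ===== SOURCE B (Python) =====
-- def get_minimum_groups2(length: list, breadth: list):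
--     n = len(length) - 1
--     rects = sorted(zip(length[:n], breadth[:n]), key=lambda r: r[0])
--     tails = []
--     for _, b in rects:
--         # rightmost insertion point of b in tails (non-decreasing LIS)
--         lo, hi = 0, len(tails)
--         while lo < hi:
--             mid = (lo + hi) // 2
--             if tails[mid] <= b:
--                 lo = mid + 1
--             else:
--                 hi = mid
--         if lo == len(tails):
--             tails.append(b)
--         else:
--             tails[lo] = b
--     return n - len(tails)
-- ===== Notes on version B (the rewrite author's own statement) =====
-- stated objective: faster
-- what changed: Replaces the quadratic LIS dynamic program (nested loops over all earlier rectangles) by patience sorting: a single pass maintaining the sorted 'tails' array, each element placed by a hand-written binary search, so the answer is n minus the tails length.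
import Mathlib
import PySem

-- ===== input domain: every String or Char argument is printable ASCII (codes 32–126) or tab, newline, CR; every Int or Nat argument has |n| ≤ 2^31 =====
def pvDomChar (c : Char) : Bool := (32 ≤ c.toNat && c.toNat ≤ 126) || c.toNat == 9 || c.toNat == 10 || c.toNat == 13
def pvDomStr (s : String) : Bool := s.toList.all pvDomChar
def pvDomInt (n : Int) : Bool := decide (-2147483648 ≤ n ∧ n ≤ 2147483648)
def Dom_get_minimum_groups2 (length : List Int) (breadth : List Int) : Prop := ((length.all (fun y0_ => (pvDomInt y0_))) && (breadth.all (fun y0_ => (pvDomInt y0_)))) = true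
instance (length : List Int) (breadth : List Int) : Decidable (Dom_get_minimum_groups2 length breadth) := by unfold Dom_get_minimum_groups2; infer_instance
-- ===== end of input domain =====

-- B replaces A's quadratic LIS dynamic program by patience sorting (tails array with
-- binary search), an asymptotically faster exact re-implementation of the same value.


-- ===== PORT A =====
def get_minimum_groups2 (length : List Int) (breadth : List Int) : Int :=
  let n : Int := (length.length : Int) - 1
  let rectangles : List (Int × Int) :=
    (PySem.List.pyRange 0 n 1).map (fun i =>
      (PySem.List.pyGetD length i 0, PySem.List.pyGetD breadth i 0))
  let rectangles := PySem.List.sorted rectangles (fun x => x.1)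
  let lis : List Int := List.replicate n.toNat 1
  let lis :=
    (PySem.List.pyRange 1 n 1).foldl (fun lis i =>
      (PySem.List.pyRange 0 i 1).foldl (fun lis j =>
        if (PySem.List.pyGetD rectangles j (0, 0)).2 ≤ (PySem.List.pyGetD rectangles i (0, 0)).2 then
          PySem.List.pySetD lis i
            (max (PySem.List.pyGetD lis i 0) (PySem.List.pyGetD lis j 0 + 1))
        else lis) lis) lis
  n - (PySem.List.max? lis (fun y => y)).getD 0   -- max(lis): Pre_ guarantees lis ≠ []

-- ===== PORT B =====
-- Source B's hand-written binary search, step for step (lo, hi are nonnegative Python ints,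
-- (lo+hi)//2 on nonnegatives is Nat division; tails[mid] is in range whenever hi ≤ len).
-- The fuel argument (hi - lo, by which the while loop terminates) only makes the same
-- computation total; each iteration shrinks hi - lo by at least 1, so it never runs out.
def pvBisectGo (t : List Int) (b : Int) : Nat → Nat → Nat → Nat
  | 0, lo, _ => lo
  | d + 1, lo, hi =>
    if lo < hi then
      if t.getD ((lo + hi) / 2) 0 ≤ b then pvBisectGo t b d ((lo + hi) / 2 + 1) hi
      else pvBisectGo t b d lo ((lo + hi) / 2)
    else lo

def pvBisect (tails : List Int) (b : Int) (lo hi : Nat) : Nat :=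
  pvBisectGo tails b (hi - lo) lo hi

def get_minimum_groups2_alt (length : List Int) (breadth : List Int) : Int :=
  let n : Int := (length.length : Int) - 1
  let rects := PySem.List.sorted
      ((PySem.List.slice length none (some n)).zip (PySem.List.slice breadth none (some n)))
      (fun r => r.1)
  let tails : List Int := rects.foldl (fun tails r =>
      let lo := pvBisect tails r.2 0 tails.length
      if lo = tails.length then tails ++ [r.2] else tails.set lo r.2) []
  n - (tails.length : Int)

-- ===== PRECONDITION & SPEC =====
-- Pre_ excludes exactly the inputs where Python A raises: len(length) ≤ 1 makes max(lis)
-- a max of an empty list (ValueError), and breadth shorter than len(length)-1 makes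
-- breadth[i] an IndexError.
def Pre_get_minimum_groups2 (length : List Int) (breadth : List Int) : Prop :=
  2 ≤ length.length ∧ length.length - 1 ≤ breadth.length
instance (length : List Int) (breadth : List Int) : Decidable (Pre_get_minimum_groups2 length breadth) := by unfold Pre_get_minimum_groups2; infer_instance

def pvWitness_get_minimum_groups2 : List Int × List Int := ([4, 3, 5, 2], [1, 3, 2])

def Spec_get_minimum_groups2 (length : List Int) (breadth : List Int) (out : Int) : Prop := out = get_minimum_groups2_alt length breadth
instance (length : List Int) (breadth : List Int) (out : Int) : Decidable (Spec_get_minimum_groups2 length breadth out) := by unfold Spec_get_minimum_groups2; infer_instance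

-- ===== CLAIM (what is proved, stated in full; the proofs are below) =====
def Claim_equal_get_minimum_groups2 : Prop := ∀ (length : List Int) (breadth : List Int), Dom_get_minimum_groups2 length breadth → Pre_get_minimum_groups2 length breadth → Spec_get_minimum_groups2 length breadth (get_minimum_groups2 length breadth)

-- ===== LEMMAS AND PROOFS =====

-- ---- the clean dynamic program A computes ----
-- process breadths left to right keeping (breadth, lis-value) pairs; each new lis value
-- is 1 + max over earlier pairs with breadth ≤ the new one.
def pvLisv (ps : List (Int × Int)) (x : Int) : Int :=
  ps.foldl (fun m p => if p.1 ≤ x then max m (p.2 + 1) else m) 1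

def pvDpStep (ps : List (Int × Int)) (x : Int) : List (Int × Int) := ps ++ [(x, pvLisv ps x)]

def pvDpRun (bs : List Int) : List (Int × Int) := bs.foldl pvDpStep []

def pvMaxSnd (ps : List (Int × Int)) : Int := ps.foldl (fun m p => max m p.2) 0

-- ---- the clean tails step B computes ----
def pvTStep (t : List Int) (x : Int) : List Int :=
  if PySem.List.bisectRight t x = t.length then t ++ [x]
  else t.set (PySem.List.bisectRight t x) x

def pvTRun (bs : List Int) : List Int := bs.foldl pvTStep []

-- ---- the patience-sorting invariant: t is sorted, its length is the max lis value,
-- and t[k] is the minimal breadth ending a chain of lis-value ≥ k+1 ----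
def pvInv (ps : List (Int × Int)) (t : List Int) : Prop :=
  t.Pairwise (· ≤ ·) ∧ pvMaxSnd ps = (t.length : Int) ∧ (∀ p ∈ ps, 1 ≤ p.2) ∧
  ∀ k (hk : k < t.length),
    (∃ p ∈ ps, (k : Int) + 1 ≤ p.2 ∧ p.1 = t[k]) ∧
    (∀ p ∈ ps, (k : Int) + 1 ≤ p.2 → t[k] ≤ p.1)

-- ---- pvBisect meets the bisect_right characterisation on a sorted list ----
theorem pvBisect_spec (t : List Int) (x : Int) (hs : t.Pairwise (· ≤ ·)) :
    ∀ (lo hi : Nat), hi ≤ t.length → lo ≤ hi →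
    (∀ j, j < lo → ∀ (hj : j < t.length), t[j] ≤ x) →
    (∀ j, hi ≤ j → ∀ (hj : j < t.length), x < t[j]) →
    lo ≤ pvBisect t x lo hi ∧ pvBisect t x lo hi ≤ hi ∧
    (∀ j, j < pvBisect t x lo hi → ∀ (hj : j < t.length), t[j] ≤ x) ∧
    (∀ j, pvBisect t x lo hi ≤ j → ∀ (hj : j < t.length), x < t[j]) := by
  have sorted := List.pairwise_iff_getElem.mp hs
  have main : ∀ (d lo hi : Nat), hi - lo ≤ d → hi ≤ t.length → lo ≤ hi →
      (∀ j, j < lo → ∀ (hj : j < t.length), t[j] ≤ x) →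
      (∀ j, hi ≤ j → ∀ (hj : j < t.length), x < t[j]) →
      lo ≤ pvBisectGo t x d lo hi ∧ pvBisectGo t x d lo hi ≤ hi ∧
      (∀ j, j < pvBisectGo t x d lo hi → ∀ (hj : j < t.length), t[j] ≤ x) ∧
      (∀ j, pvBisectGo t x d lo hi ≤ j → ∀ (hj : j < t.length), x < t[j]) := by
    intro d
    induction d with
    | zero =>
      intro lo hi hd hlen hlohi hlo hhi
      have hEq : lo = hi := by omega
      simp only [pvBisectGo]
      exact ⟨le_refl _, by omega, fun j hj => hlo j hj, fun j hj => hhi j (by omega)⟩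
    | succ d ih =>
      intro lo hi hd hlen hlohi hlo hhi
      simp only [pvBisectGo]
      by_cases h : lo < hi
      · rw [if_pos h]
        have hmid1 : lo ≤ (lo + hi) / 2 := by omega
        have hmid2 : (lo + hi) / 2 < hi := by omega
        have hmlen : (lo + hi) / 2 < t.length := by omega
        rw [List.getD_eq_getElem t 0 hmlen]
        by_cases hc : t[(lo + hi) / 2] ≤ x
        · simp only [hc, if_true]
          have := ih ((lo + hi) / 2 + 1) hi (by omega) hlen (by omega)
            (fun j hj hjl => by
              by_cases hjlo : j < lo
              · exact hlo j hjlo hjl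
              · by_cases hje : j = (lo + hi) / 2
                · subst hje; exact hc
                · exact le_trans (sorted j ((lo + hi) / 2) hjl hmlen (by omega)) hc)
            hhi
          exact ⟨by omega, by omega, this.2.2.1, this.2.2.2⟩
        · simp only [hc, if_false]
          have hc2 : x < t[(lo + hi) / 2] := not_le.mp hc
          have := ih lo ((lo + hi) / 2) (by omega) (by omega) (by omega) hlo
            (fun j hj hjl => by
              have hle : t[(lo + hi) / 2] ≤ t[j] := by
                rcases Nat.eq_or_lt_of_le hj with h1 | h1
                · subst h1; exact le_refl _
                · exact sorted _ j hmlen hjl h1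
              exact lt_of_lt_of_le hc2 hle)
          exact ⟨this.1, by omega, this.2.2.1, this.2.2.2⟩
      · rw [if_neg h]
        exact ⟨le_refl _, by omega, fun j hj => hlo j hj, fun j hj => hhi j (by omega)⟩
  intro lo hi hlen hlohi hlo hhi
  exact main (hi - lo) lo hi (le_refl _) hlen hlohi hlo hhi

theorem pvBisect_eq_bisectRight (t : List Int) (x : Int) (hs : t.Pairwise (· ≤ ·)) :
    pvBisect t x 0 t.length = PySem.List.bisectRight t x := by
  obtain ⟨-, h1, h2, h3⟩ := pvBisect_spec t x hs 0 t.length (le_refl _) (Nat.zero_le _)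
    (by omega) (fun j hj hjl => absurd hjl (by omega))
  obtain ⟨g1, g2, g3⟩ := PySem.List.bisectRight_spec t x hs
  set r1 := pvBisect t x 0 t.length
  set r2 := PySem.List.bisectRight t x
  rcases Nat.lt_trichotomy r1 r2 with hlt | heq | hgt
  · have hr1 : r1 < t.length := by omega
    have := h3 r1 (le_refl _) hr1
    have := g2 r1 hr1 hlt
    omega
  · exact heq
  · have hr2 : r2 < t.length := by omega
    have := h2 r2 hgt hr2
    have := g3 r2 hr2 (le_refl _)
    omega

-- ---- characterisation of pvLisv ----
theorem pvLisv_spec (ps : List (Int × Int)) (x : Int) :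
    1 ≤ pvLisv ps x ∧ (∀ p ∈ ps, p.1 ≤ x → p.2 + 1 ≤ pvLisv ps x) ∧
    (pvLisv ps x = 1 ∨ ∃ p ∈ ps, p.1 ≤ x ∧ pvLisv ps x = p.2 + 1) := by
  have aux : ∀ (ps : List (Int × Int)) (c : Int),
      c ≤ ps.foldl (fun m p => if p.1 ≤ x then max m (p.2 + 1) else m) c ∧
      (∀ p ∈ ps, p.1 ≤ x → p.2 + 1 ≤ ps.foldl (fun m p => if p.1 ≤ x then max m (p.2 + 1) else m) c) ∧
      (ps.foldl (fun m p => if p.1 ≤ x then max m (p.2 + 1) else m) c = c ∨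
        ∃ p ∈ ps, p.1 ≤ x ∧ ps.foldl (fun m p => if p.1 ≤ x then max m (p.2 + 1) else m) c = p.2 + 1) := by
    intro ps
    induction ps with
    | nil => intro c; exact ⟨le_refl _, by simp, Or.inl rfl⟩
    | cons q qs ih =>
      intro c
      simp only [List.foldl_cons]
      by_cases hq : q.1 ≤ x
      · simp only [hq, if_true]
        obtain ⟨i1, i2, i3⟩ := ih (max c (q.2 + 1))
        refine ⟨le_trans (le_max_left _ _) i1, ?_, ?_⟩
        · intro p hp hpx
          rcases List.mem_cons.mp hp with hp | hp
          · subst hp; exact le_trans (le_max_right _ _) i1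
          · exact i2 p hp hpx
        · rcases i3 with h | ⟨p, hp, hpx, he⟩
          · rcases max_cases c (q.2 + 1) with ⟨hm, -⟩ | ⟨hm, -⟩
            · exact Or.inl (by rw [h, hm])
            · exact Or.inr ⟨q, List.mem_cons_self, hq, by rw [h, hm]⟩
          · exact Or.inr ⟨p, List.mem_cons_of_mem _ hp, hpx, he⟩
      · simp only [hq, if_false]
        obtain ⟨i1, i2, i3⟩ := ih c
        refine ⟨i1, ?_, ?_⟩
        · intro p hp hpx
          rcases List.mem_cons.mp hp with hp | hp
          · subst hp; exact absurd hpx hq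
          · exact i2 p hp hpx
        · rcases i3 with h | ⟨p, hp, hpx, he⟩
          · exact Or.inl h
          · exact Or.inr ⟨p, List.mem_cons_of_mem _ hp, hpx, he⟩
  obtain ⟨a1, a2, a3⟩ := aux ps 1
  exact ⟨a1, a2, a3⟩

-- ---- basic dp-run facts ----
theorem pvDpRun_append (bs : List Int) (x : Int) :
    pvDpRun (bs ++ [x]) = pvDpRun bs ++ [(x, pvLisv (pvDpRun bs) x)] := by
  simp [pvDpRun, List.foldl_append, pvDpStep]

theorem pvDpRun_map_fst (bs : List Int) : (pvDpRun bs).map Prod.fst = bs := by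
  induction bs using List.reverseRecOn with
  | nil => rfl
  | append_singleton ys x ih => rw [pvDpRun_append]; simp [ih]

theorem pvDpRun_length (bs : List Int) : (pvDpRun bs).length = bs.length := by
  have := congrArg List.length (pvDpRun_map_fst bs)
  simpa using this

theorem pvMaxSnd_append (ps : List (Int × Int)) (p : Int × Int) :
    pvMaxSnd (ps ++ [p]) = max (pvMaxSnd ps) p.2 := by
  simp [pvMaxSnd, List.foldl_append]

theorem pvMaxSnd_le (ps : List (Int × Int)) (p : Int × Int) (hp : p ∈ ps) :
    p.2 ≤ pvMaxSnd ps := by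
  exact (PySem.List.le_foldl_max_int ps Prod.snd 0).2 p hp

-- ---- the value the dp assigns to the new element is bisect_right + 1 ----
theorem pvLisv_eq (ps : List (Int × Int)) (t : List Int) (x : Int) (hI : pvInv ps t) :
    pvLisv ps x = (PySem.List.bisectRight t x : Int) + 1 := by
  obtain ⟨hsort, hmax, hone, hmin⟩ := hI
  obtain ⟨hr1, hr2, hr3⟩ := PySem.List.bisectRight_spec t x hsort
  obtain ⟨l1, l2, l3⟩ := pvLisv_spec ps x
  set r := PySem.List.bisectRight t x with hrdef
  have hge : (r : Int) + 1 ≤ pvLisv ps x := by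
    rcases Nat.eq_zero_or_pos r with hr0 | hrpos
    · rw [hr0]; exact_mod_cast l1
    · have hrlt : r - 1 < t.length := by omega
      obtain ⟨p, hp, hp2, hp1⟩ := (hmin (r - 1) hrlt).1
      have hpx : p.1 ≤ x := by rw [hp1]; exact hr2 (r - 1) hrlt (by omega)
      have := l2 p hp hpx
      have hcast : ((r - 1 : Nat) : Int) = (r : Int) - 1 := by omega
      omega
  have hle : pvLisv ps x ≤ (r : Int) + 1 := by
    rcases l3 with h1 | ⟨p, hp, hpx, he⟩
    · rw [h1]; omega
    · rw [he]
      by_contra hcon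
      have hp2 : (r : Int) + 1 ≤ p.2 := by omega
      have hpm : p.2 ≤ pvMaxSnd ps := pvMaxSnd_le ps p hp
      have hrlt : r < t.length := by omega
      have h4 := (hmin r hrlt).2 p hp hp2
      have h5 := hr3 r hrlt (le_refl _)
      have : x < p.1 := lt_of_lt_of_le h5 h4
      omega
  omega

-- ---- the invariant is preserved by one step ----
theorem pvInv_step (ps : List (Int × Int)) (t : List Int) (x : Int) (hI : pvInv ps t) :
    pvInv (pvDpStep ps x) (pvTStep t x) := by
  have hlv := pvLisv_eq ps t x hI
  obtain ⟨hsort, hmax, hone, hmin⟩ := hI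
  obtain ⟨hr1, hr2, hr3⟩ := PySem.List.bisectRight_spec t x hsort
  set r := PySem.List.bisectRight t x with hrdef
  have hsorted' := List.pairwise_iff_getElem.mp hsort
  unfold pvDpStep pvTStep
  rw [← hrdef, hlv]
  by_cases hcase : r = t.length
  · -- append case
    rw [if_pos hcase]
    refine ⟨?_, ?_, ?_, ?_⟩
    · rw [List.pairwise_append]
      refine ⟨hsort, List.pairwise_singleton _ _, ?_⟩
      intro a ha b hb
      rw [List.mem_singleton] at hb; subst hb
      obtain ⟨j, hj, hja⟩ := List.mem_iff_getElem.mp ha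
      rw [← hja]; exact hr2 j hj (by omega)
    · rw [pvMaxSnd_append, hmax]
      simp only [List.length_append, List.length_singleton]
      rw [hcase]; push_cast; omega
    · intro p hp
      rcases List.mem_append.mp hp with hp | hp
      · exact hone p hp
      · rw [List.mem_singleton] at hp; subst hp; omega
    · intro k hk
      simp only [List.length_append, List.length_singleton] at hk
      by_cases hkl : k < t.length
      · have hget : (t ++ [x])[k]'(by simp; omega) = t[k] := List.getElem_append_left hkl
        rw [hget]
        obtain ⟨⟨p, hp, hp2, hp1⟩, hmin2⟩ := hmin k hkl
        refine ⟨⟨p, List.mem_append_left _ hp, hp2, hp1⟩, ?_⟩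
        intro q hq hq2
        rcases List.mem_append.mp hq with hq | hq
        · exact hmin2 q hq hq2
        · rw [List.mem_singleton] at hq; subst hq
          exact hr2 k hkl (by omega)
      · have hke : k = t.length := by omega
        have hget : (t ++ [x])[k]'(by simp; omega) = x := by
          subst hke; simp
        rw [hget]
        refine ⟨⟨(x, (r : Int) + 1), List.mem_append_right _ (List.mem_singleton_self _), by
          rw [hke, hcase], rfl⟩, ?_⟩
        intro q hq hq2
        rcases List.mem_append.mp hq with hq | hq
        · have := pvMaxSnd_le ps q hq
          rw [hmax] at this
          exfalso; rw [hke] at hq2; omega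
        · rw [List.mem_singleton] at hq; subst hq; exact le_refl _
  · -- set case
    have hrlt : r < t.length := by omega
    rw [if_neg hcase]
    refine ⟨?_, ?_, ?_, ?_⟩
    · rw [List.pairwise_iff_getElem]
      intro i j hi hj hij
      simp only [List.length_set] at hi hj
      rw [List.getElem_set, List.getElem_set]
      split_ifs with h1 h2 h2
      · omega
      · subst h1; exact le_of_lt (hr3 j hj (by omega))
      · subst h2; exact hr2 i hi (by omega)
      · exact hsorted' i j hi hj hij
    · rw [pvMaxSnd_append, hmax]
      simp only [List.length_set]
      rw [max_eq_left (by omega)]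
    · intro p hp
      rcases List.mem_append.mp hp with hp | hp
      · exact hone p hp
      · rw [List.mem_singleton] at hp; subst hp; omega
    · intro k hk
      simp only [List.length_set] at hk
      rcases Nat.lt_trichotomy k r with hkr | hkr | hkr
      · rw [List.getElem_set_ne (by omega) (by simp [hk])]
        obtain ⟨⟨p, hp, hp2, hp1⟩, hmin2⟩ := hmin k hk
        refine ⟨⟨p, List.mem_append_left _ hp, hp2, hp1⟩, ?_⟩
        intro q hq hq2
        rcases List.mem_append.mp hq with hq | hq
        · exact hmin2 q hq hq2
        · rw [List.mem_singleton] at hq; subst hq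
          exact hr2 k hk (by omega)
      · subst hkr
        rw [List.getElem_set_self (by simp [hk])]
        refine ⟨⟨(x, (r : Int) + 1), List.mem_append_right _ (List.mem_singleton_self _),
          by simp, rfl⟩, ?_⟩
        intro q hq hq2
        rcases List.mem_append.mp hq with hq | hq
        · have h4 := (hmin r hrlt).2 q hq (by exact_mod_cast hq2)
          have h5 := hr3 r hrlt (le_refl _)
          exact le_of_lt (lt_of_lt_of_le h5 h4)
        · rw [List.mem_singleton] at hq; subst hq; exact le_refl _
      · rw [List.getElem_set_ne (by omega) (by simp [hk])]
        obtain ⟨⟨p, hp, hp2, hp1⟩, hmin2⟩ := hmin k hk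
        refine ⟨⟨p, List.mem_append_left _ hp, hp2, hp1⟩, ?_⟩
        intro q hq hq2
        rcases List.mem_append.mp hq with hq | hq
        · exact hmin2 q hq hq2
        · rw [List.mem_singleton] at hq; subst hq
          simp only at hq2; omega

theorem pvTRun_append (bs : List Int) (x : Int) :
    pvTRun (bs ++ [x]) = pvTStep (pvTRun bs) x := by
  simp [pvTRun, List.foldl_append]

theorem pvInv_run (bs : List Int) : pvInv (pvDpRun bs) (pvTRun bs) := by
  induction bs using List.reverseRecOn with
  | nil =>
    refine ⟨List.Pairwise.nil, rfl, by simp [pvDpRun], ?_⟩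
    intro k hk; simp [pvTRun] at hk
  | append_singleton ys x ih =>
    rw [pvDpRun_append, pvTRun_append]
    exact pvInv_step _ _ x ih

-- ---- port B's fold equals the clean tails run ----
theorem pvAlt_run (rects : List (Int × Int)) :
    rects.foldl (fun tails r =>
      let lo := pvBisect tails r.2 0 tails.length
      if lo = tails.length then tails ++ [r.2] else tails.set lo r.2) [] =
    pvTRun (rects.map Prod.snd) := by
  induction rects using List.reverseRecOn with
  | nil => rfl
  | append_singleton ys r ih =>
    rw [List.foldl_append, ih, List.map_append]
    simp only [List.map_cons, List.map_nil, pvTRun_append]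
    simp only [List.foldl_cons, List.foldl_nil]
    have hsorted := (pvInv_run (ys.map Prod.snd)).1
    rw [pvBisect_eq_bisectRight _ _ hsorted]
    rfl

theorem pvLisv_append (ps : List (Int × Int)) (p : Int × Int) (x : Int) :
    pvLisv (ps ++ [p]) x =
      if p.1 ≤ x then max (pvLisv ps x) (p.2 + 1) else pvLisv ps x := by
  simp [pvLisv, List.foldl_append]

-- ---- port A's nested index loops compute the clean dp's lis list ----
theorem pvInner_loop (rects : List (Int × Int)) (k : Nat)
    (hkn : k < rects.length) (lis : List Int)
    (hlis : lis = (pvDpRun ((rects.map Prod.snd).take k)).map Prod.snd ++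
      List.replicate (rects.length - k) 1) :
    (PySem.List.pyRange 0 (k : Int) 1).foldl (fun lis j =>
        if (PySem.List.pyGetD rects j (0, 0)).2 ≤ (PySem.List.pyGetD rects (k : Int) (0, 0)).2 then
          PySem.List.pySetD lis (k : Int)
            (max (PySem.List.pyGetD lis (k : Int) 0) (PySem.List.pyGetD lis j 0 + 1))
        else lis) lis =
    (pvDpRun ((rects.map Prod.snd).take (k + 1))).map Prod.snd ++
      List.replicate (rects.length - (k + 1)) 1 := by
  set bs := rects.map Prod.snd with hbsdef
  have hbsl : bs.length = rects.length := by simp [hbsdef]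
  set ps := pvDpRun (bs.take k) with hpsdef
  have hpsl : ps.length = k := by
    rw [hpsdef, pvDpRun_length, List.length_take]; omega
  have hLl : (ps.map Prod.snd).length = k := by simp [hpsl]
  have hlislen : lis.length = rects.length := by
    rw [hlis]; simp [hLl]; omega
  have hklis : k < lis.length := by omega
  have hgk : PySem.List.pyGetD rects (k : Int) (0, 0) = rects[k] := by
    rw [PySem.List.pyGetD_natCast, List.getD_eq_getElem rects (0, 0) hkn]
  have hfst : ∀ m (hm : m < k), (ps[m]'(by omega)).1 = (rects[m]'(by omega)).2 := by
    intro m hm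
    have e1 : ps.map Prod.fst = bs.take k := by rw [hpsdef]; exact pvDpRun_map_fst _
    calc (ps[m]'(by omega)).1
        = (ps.map Prod.fst)[m]'(by simp [hpsl]; omega) := (List.getElem_map _).symm
      _ = (bs.take k)[m]'(by rw [← e1]; simp [hpsl]; omega) := List.getElem_of_eq e1 (by simp [hpsl]; omega)
      _ = bs[m]'(by omega) := List.getElem_take ..
      _ = (rects[m]'(by omega)).2 := List.getElem_map _
  have hsnd : ∀ m (hm : m < k), (ps.map Prod.snd)[m]'(by omega) = (ps[m]'(by omega)).2 :=
    fun m hm => List.getElem_map _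
  have key : ∀ m, m ≤ k →
      (PySem.List.pyRange 0 (m : Int) 1).foldl (fun lis j =>
        if (PySem.List.pyGetD rects j (0, 0)).2 ≤ (PySem.List.pyGetD rects (k : Int) (0, 0)).2 then
          PySem.List.pySetD lis (k : Int)
            (max (PySem.List.pyGetD lis (k : Int) 0) (PySem.List.pyGetD lis j 0 + 1))
        else lis) lis =
      lis.set k (pvLisv (ps.take m) (rects[k]'hkn).2) := by
    intro m
    induction m with
    | zero =>
      intro _
      rw [show ((0 : Nat) : Int) = 0 from rfl, PySem.List.pyRange_one_eq_nil (le_refl 0)]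
      simp only [List.foldl_nil, List.take_zero]
      have hv : pvLisv [] (rects[k]'hkn).2 = 1 := rfl
      rw [hv]
      have hget : lis[k]'hklis = 1 := by
        rw [List.getElem_of_eq hlis hklis]
        rw [List.getElem_append_right (by omega)]
        rw [List.getElem_replicate]
      rw [← hget, List.set_getElem_self]
    | succ m ih =>
      intro hm1
      have hmk : m < k := by omega
      have hih := ih (by omega)
      rw [show ((m + 1 : Nat) : Int) = (m : Int) + 1 by push_cast; ring]
      rw [PySem.List.pyRange_one_succ_right (by exact_mod_cast Int.ofNat_le.mpr (Nat.zero_le m))]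
      rw [List.foldl_append, hih]
      simp only [List.foldl_cons, List.foldl_nil]
      have hklis' : k < (lis.set k (pvLisv (ps.take m) (rects[k]'hkn).2)).length := by
        simp [hklis]
      have hgm : PySem.List.pyGetD rects (m : Int) (0, 0) = rects[m]'(by omega) := by
        rw [PySem.List.pyGetD_natCast, List.getD_eq_getElem rects (0, 0) (by omega)]
      have hreadk : PySem.List.pyGetD (lis.set k (pvLisv (ps.take m) (rects[k]'hkn).2)) (k : Int) 0 =
          pvLisv (ps.take m) (rects[k]'hkn).2 := by
        rw [PySem.List.pyGetD_natCast, List.getD_eq_getElem _ 0 hklis']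
        exact List.getElem_set_self hklis'
      have hreadm : PySem.List.pyGetD (lis.set k (pvLisv (ps.take m) (rects[k]'hkn).2)) (m : Int) 0 =
          (ps[m]'(by omega)).2 := by
        rw [PySem.List.pyGetD_natCast, List.getD_eq_getElem _ 0 (by simp; omega)]
        rw [List.getElem_set]
        rw [if_neg (by omega)]
        rw [List.getElem_of_eq hlis (by omega), List.getElem_append_left (by omega), hsnd m hmk]
      have htake : ps.take (m + 1) = ps.take m ++ [ps[m]'(by omega)] :=
        List.take_succ_eq_append_getElem (by omega)
      rw [hgm, hgk, hreadk, hreadm, htake, pvLisv_append, hfst m hmk]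
      by_cases hc : (rects[m]'(by omega)).2 ≤ (rects[k]'hkn).2
      · rw [if_pos hc, if_pos hc]
        rw [PySem.List.pySetD_natCast, List.set_set]
      · rw [if_neg hc, if_neg hc]
  have hfinal := key k (le_refl k)
  rw [hfinal]
  have htps : ps.take k = ps := by rw [← hpsl]; exact List.take_length ..
  rw [htps]
  have htk1 : bs.take (k + 1) = bs.take k ++ [bs[k]'(by omega)] :=
    List.take_succ_eq_append_getElem (by omega)
  rw [htk1, pvDpRun_append, ← hpsdef]
  have hbk : bs[k]'(by omega) = (rects[k]'hkn).2 := List.getElem_map _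
  rw [hbk]
  rw [List.map_append]
  have hrep : List.replicate (rects.length - k) (1 : Int) =
      1 :: List.replicate (rects.length - (k + 1)) 1 := by
    rw [show rects.length - k = (rects.length - (k + 1)) + 1 by omega, List.replicate_succ]
  rw [hlis, hrep]
  rw [List.set_append]
  rw [if_neg (by omega)]
  rw [hLl]
  simp

theorem pvOuter_loop (rects : List (Int × Int)) (k : Nat) (hk1 : 1 ≤ k)
    (hkn : k ≤ rects.length) :
    (PySem.List.pyRange 1 (k : Int) 1).foldl (fun lis i =>
      (PySem.List.pyRange 0 i 1).foldl (fun lis j =>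
        if (PySem.List.pyGetD rects j (0, 0)).2 ≤ (PySem.List.pyGetD rects i (0, 0)).2 then
          PySem.List.pySetD lis i
            (max (PySem.List.pyGetD lis i 0) (PySem.List.pyGetD lis j 0 + 1))
        else lis) lis) (List.replicate rects.length 1) =
    (pvDpRun ((rects.map Prod.snd).take k)).map Prod.snd ++
      List.replicate (rects.length - k) 1 := by
  induction k with
  | zero => omega
  | succ m ih =>
    by_cases hm0 : m = 0
    · subst hm0
      rw [show ((1 : Nat) : Int) = 1 by norm_num, PySem.List.pyRange_one_eq_nil (le_refl 1)]
      simp only [List.foldl_nil]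
      have hbl : 0 < (rects.map Prod.snd).length := by simp; omega
      have ht1 : (rects.map Prod.snd).take 1 = [(rects.map Prod.snd)[0]'hbl] := by
        rw [show (1 : Nat) = 0 + 1 from rfl, List.take_succ_eq_append_getElem hbl]
        simp
      rw [ht1]
      have hdp : pvDpRun [(rects.map Prod.snd)[0]'hbl] =
          [((rects.map Prod.snd)[0]'hbl, 1)] := rfl
      rw [hdp]
      simp only [List.map_cons, List.map_nil]
      rw [show rects.length = (rects.length - 1) + 1 by omega, List.replicate_succ]
      simp
    · have hm1 : 1 ≤ m := by omega
      have hmn : m < rects.length := by omega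
      have hih := ih hm1 (by omega)
      rw [show ((m + 1 : Nat) : Int) = (m : Int) + 1 by push_cast; ring]
      rw [PySem.List.pyRange_one_succ_right (by exact_mod_cast Nat.one_le_cast.mpr hm1)]
      rw [List.foldl_append, hih]
      simp only [List.foldl_cons, List.foldl_nil]
      exact pvInner_loop rects m hmn _ rfl

-- ---- max(lis) over the dp's lis list is pvMaxSnd ----
theorem pvMax_bridge (ps : List (Int × Int)) (hne : ps ≠ []) (h1 : ∀ p ∈ ps, 1 ≤ p.2) :
    (PySem.List.max? (ps.map Prod.snd) (fun y => y)).getD 0 = pvMaxSnd ps := by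
  cases ps with
  | nil => exact absurd rfl hne
  | cons q qs =>
    simp only [List.map_cons]
    rw [PySem.List.max?_id_cons, Option.getD_some]
    unfold pvMaxSnd
    simp only [List.foldl_cons]
    rw [max_eq_right (le_trans (by omega) (h1 q List.mem_cons_self))]
    rw [← List.foldl_map (f := Prod.snd) (g := fun m y => max m y)]

-- ---- both ports build the same (pre-sort) rectangle list under Pre_ ----
theorem pvRects_eq (length breadth : List Int) (h2 : 2 ≤ length.length)
    (hb : length.length - 1 ≤ breadth.length) :
    (PySem.List.pyRange 0 ((length.length : Int) - 1) 1).map (fun i =>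
      (PySem.List.pyGetD length i 0, PySem.List.pyGetD breadth i 0)) =
    (PySem.List.slice length none (some ((length.length : Int) - 1))).zip
      (PySem.List.slice breadth none (some ((length.length : Int) - 1))) := by
  rw [PySem.List.slice_to _ (by omega), PySem.List.slice_to _ (by omega)]
  apply List.ext_getElem
  · simp [PySem.List.length_pyRange_one]; omega
  · intro i hi1 hi2
    have hiL : i < length.length - 1 := by
      simp [PySem.List.length_pyRange_one] at hi1; omega
    rw [List.getElem_map, List.getElem_zip]
    rw [PySem.List.getElem_pyRange_one]
    simp only [zero_add]
    rw [List.getElem_take, List.getElem_take]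
    have h1 : PySem.List.pyGetD length ((i : Nat) : Int) 0 = length[i]'(by omega) := by
      rw [PySem.List.pyGetD_natCast, List.getD_eq_getElem length 0 (by omega)]
    have h2 : PySem.List.pyGetD breadth ((i : Nat) : Int) 0 = breadth[i]'(by omega) := by
      rw [PySem.List.pyGetD_natCast, List.getD_eq_getElem breadth 0 (by omega)]
    rw [h1, h2]

-- ===== VERDICT (by name: the statement is the Claim_ definition above) =====
theorem get_minimum_groups2_spec : Claim_equal_get_minimum_groups2 := by
  intro length breadth _hDom hPre
  obtain ⟨h2, hb⟩ := hPre
  unfold Spec_get_minimum_groups2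
  simp only [get_minimum_groups2, get_minimum_groups2_alt]
  rw [pvRects_eq length breadth h2 hb]
  set rects := PySem.List.sorted
      ((PySem.List.slice length none (some ((length.length : Int) - 1))).zip
        (PySem.List.slice breadth none (some ((length.length : Int) - 1))))
      (fun r => r.1) with hrects
  have hrlen : rects.length = length.length - 1 := by
    rw [hrects, PySem.List.length_sorted]
    rw [PySem.List.slice_to _ (by omega), PySem.List.slice_to _ (by omega)]
    simp [List.length_zip]
    omega
  have h1r : 1 ≤ rects.length := by omega
  have hnat : ((length.length : Int) - 1).toNat = rects.length := by omega
  have hint : (length.length : Int) - 1 = (rects.length : Int) := by omega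
  rw [hnat, hint]
  rw [pvOuter_loop rects rects.length h1r (le_refl _)]
  have hbsl : (rects.map Prod.snd).length = rects.length := List.length_map _
  have htake : (rects.map Prod.snd).take rects.length = rects.map Prod.snd := by
    rw [← hbsl]; exact List.take_length ..
  rw [htake]
  simp only [Nat.sub_self, List.replicate_zero, List.append_nil]
  have hIr := pvInv_run (rects.map Prod.snd)
  have hne : pvDpRun (rects.map Prod.snd) ≠ [] := by
    intro hcon
    have := pvDpRun_length (rects.map Prod.snd)
    rw [hcon] at this
    simp at this
    omega
  rw [pvMax_bridge _ hne hIr.2.2.1]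
  rw [hIr.2.1]
  rw [pvAlt_run rects]
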